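-- pv_equiv track=rewrite | github.com/pypi-data/pypi-mirror-300 | packages/uainsight/uainsight-0.1.0.tar.gz/uainsight-0.1.0/uainsight/core.py | _is_smart_tv
-- ===== SOURCE A (Python) =====
-- def _is_smart_tv(user_agent_lower_string: str) -> bool:
--     smart_tv_indicators = [
--         "smart-tv",
--         "smarttv",
--         "googletv",
--         "appletv",
--         "hbbtv",
--         "pov_tv",
--         "netcast.tv",
--         "tizen",
--     ]
--     return any(
--         indicator in user_agent_lower_string for indicator in smart_tv_indicators
--     )
-- ===== SOURCE B (Python) =====
-- _INDICATORS = (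
--     "smart-tv",
--     "smarttv",
--     "googletv",
--     "appletv",
--     "hbbtv",
--     "pov_tv",
--     "netcast.tv",
--     "tizen",
-- )
--
--
-- def _is_smart_tv(user_agent_lower_string: str) -> bool:
--     # single left-to-right scan: at each position try every indicator
--     s = user_agent_lower_string
--     for i in range(len(s)):
--         for ind in _INDICATORS:
--             if s.startswith(ind, i):
--                 return True
--     return False
-- ===== Notes on version B (the rewrite author's own statement) =====
-- stated objective: alternative
-- what changed: Replaced eight independent whole-string substring searches by one left-to-right scan that tests all eight indicators at each position (a single combined pass).
import Mathlib
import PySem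

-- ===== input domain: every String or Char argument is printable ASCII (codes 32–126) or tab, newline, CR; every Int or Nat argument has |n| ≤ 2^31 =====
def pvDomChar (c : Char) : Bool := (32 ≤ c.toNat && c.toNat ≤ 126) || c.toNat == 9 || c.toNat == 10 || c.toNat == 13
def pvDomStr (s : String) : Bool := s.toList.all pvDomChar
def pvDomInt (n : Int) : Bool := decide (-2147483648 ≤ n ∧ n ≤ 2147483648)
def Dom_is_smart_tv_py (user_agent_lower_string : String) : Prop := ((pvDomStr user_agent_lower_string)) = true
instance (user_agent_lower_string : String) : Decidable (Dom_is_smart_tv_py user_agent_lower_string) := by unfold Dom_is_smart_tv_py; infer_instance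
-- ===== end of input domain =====

-- B replaces A's eight independent substring searches by one combined left-to-right scan
-- that tests all eight indicators at each position; same result, alternative structure.

-- ===== PORT A =====
-- A: any(indicator in s for indicator in smart_tv_indicators)
def is_smart_tv_py (user_agent_lower_string : String) : Bool :=
  ["smart-tv", "smarttv", "googletv", "appletv", "hbbtv", "pov_tv", "netcast.tv", "tizen"].any
    (fun indicator => PySem.Str.isIn indicator user_agent_lower_string)

-- ===== PORT B =====
def pvIndicators : List String :=
  ["smart-tv", "smarttv", "googletv", "appletv", "hbbtv", "pov_tv", "netcast.tv", "tizen"]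

-- B's scan: 'for i in range(len(s)): for ind in _INDICATORS: if s.startswith(ind, i)';
-- the index loop over i is the structural recursion over suffixes (s.startswith(ind, i) on chars).
def pvScan (cs : List Char) : Bool :=
  match cs with
  | [] => false
  | c :: rest =>
      pvIndicators.any (fun ind => PySem.Chars.startswith (c :: rest) ind.toList) || pvScan rest

def is_smart_tv_py_alt (user_agent_lower_string : String) : Bool :=
  pvScan user_agent_lower_string.toList

-- ===== PRECONDITION & SPEC =====
def Spec_is_smart_tv_py (user_agent_lower_string : String) (out : Bool) : Prop := out = is_smart_tv_py_alt user_agent_lower_string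
instance (user_agent_lower_string : String) (out : Bool) : Decidable (Spec_is_smart_tv_py user_agent_lower_string out) := by unfold Spec_is_smart_tv_py; infer_instance

-- ===== CLAIM (what is proved, stated in full; the proofs are below) =====
def Claim_equal_is_smart_tv_py : Prop := ∀ (user_agent_lower_string : String), Dom_is_smart_tv_py user_agent_lower_string → Spec_is_smart_tv_py user_agent_lower_string (is_smart_tv_py user_agent_lower_string)

-- ===== LEMMAS AND PROOFS =====

-- every indicator is a nonempty string (so none can match inside the empty suffix B's scan omits)
theorem pvIndicators_ne_nil : ∀ p ∈ pvIndicators, p.toList ≠ [] := by decide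

theorem pvScan_iff (cs : List Char) :
    pvScan cs = true ↔ ∃ p ∈ pvIndicators, p.toList <:+: cs := by
  induction cs with
  | nil =>
      simp only [pvScan, List.infix_nil]
      constructor
      · intro h; cases h
      · rintro ⟨p, hp, hnil⟩; exact absurd hnil (pvIndicators_ne_nil p hp)
  | cons c rest ih =>
      simp only [pvScan, Bool.or_eq_true, List.any_eq_true, PySem.Chars.startswith_iff, ih]
      constructor
      · rintro (⟨p, hp, hpre⟩ | ⟨p, hp, hinf⟩)
        · exact ⟨p, hp, hpre.isInfix⟩
        · exact ⟨p, hp, hinf.trans (List.suffix_cons c rest).isInfix⟩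
      · rintro ⟨p, hp, hinf⟩
        rcases List.infix_cons_iff.mp hinf with hpre | hinf'
        · exact Or.inl ⟨p, hp, hpre⟩
        · exact Or.inr ⟨p, hp, hinf'⟩

theorem a_iff (s : String) :
    is_smart_tv_py s = true ↔ ∃ p ∈ pvIndicators, p.toList <:+: s.toList := by
  simp only [is_smart_tv_py, List.any_eq_true, PySem.Str.isIn_iff_infix, pvIndicators]

-- ===== VERDICT (by name: the statement is the Claim_ definition above) =====
theorem is_smart_tv_py_spec : Claim_equal_is_smart_tv_py := by
  intro s _
  unfold Spec_is_smart_tv_py is_smart_tv_py_alt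
  rw [Bool.eq_iff_iff, a_iff, pvScan_iff]
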